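-- pv_equiv track=rewrite | github.com/soumyendra98/DSA | DP/LeetCode/Maximum Score from Performing Multiplication Operations.py | maximumScore
-- ===== SOURCE A (Python) =====
-- from typing import List
--
-- def maximumScore(nums: List[int], multipliers: List[int]) -> int:
--     store = [0] * (len(multipliers) + 1)
--     n = len(nums)
--     max_score = [0] * len(multipliers)
--     for i in reversed(range(len(multipliers))):
--         for j in range(i + 1):
--             left = store[j + 1] + nums[j] * multipliers[i]
--             right = store[j] + nums[n - i + j - 1] * multipliers[i]
--             max_score[j] = max(left, right)
--         store = max_score
--     return store[0]
-- ===== SOURCE B (Python) =====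
-- from typing import List
--
-- def maximumScore(nums: List[int], multipliers: List[int]) -> int:
--     # Recursive row decomposition: row(i) is the list of best scores
--     # dp(i, j) for j = 0..i (j left picks already taken) when operations
--     # i..m-1 remain; built from row(i+1) instead of rolling a 1D array.
--     n, m = len(nums), len(multipliers)
--
--     def row(i: int) -> List[int]:
--         if i == m:
--             return [0] * (m + 1)
--         nxt = row(i + 1)
--         return [max(multipliers[i] * nums[j] + nxt[j + 1],
--                     multipliers[i] * nums[n - 1 - (i - j)] + nxt[j])
--                 for j in range(i + 1)]
--
--     return row(0)[0]
-- ===== Notes on version B (the rewrite author's own statement) =====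
-- stated objective: alternative
-- what changed: Replaces A's backward loop that rolls a 1D array in place with a recursive decomposition: row(i) builds the DP row for suffix i..m-1 as a list comprehension from row(i+1).
import Mathlib
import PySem

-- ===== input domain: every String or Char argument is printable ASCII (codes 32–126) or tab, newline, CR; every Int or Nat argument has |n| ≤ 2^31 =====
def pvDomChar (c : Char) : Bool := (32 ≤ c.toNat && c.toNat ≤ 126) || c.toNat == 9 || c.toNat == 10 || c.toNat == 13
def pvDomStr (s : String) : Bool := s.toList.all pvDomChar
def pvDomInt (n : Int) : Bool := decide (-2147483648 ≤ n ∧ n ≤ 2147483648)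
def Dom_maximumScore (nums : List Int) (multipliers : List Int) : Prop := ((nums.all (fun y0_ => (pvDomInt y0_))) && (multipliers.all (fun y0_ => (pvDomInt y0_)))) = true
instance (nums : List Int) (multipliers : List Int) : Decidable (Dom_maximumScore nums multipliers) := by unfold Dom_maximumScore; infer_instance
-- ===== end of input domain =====

-- B replaces A's backward loop rolling a 1D DP array in place with a recursive
-- row(i)-from-row(i+1) decomposition (objective: alternative, same asymptotic cost).

-- shared indexing helper: xs[k] with Python semantics; 'none' would be an
-- IndexError, which Pre_maximumScore excludes, so the default is never taken there.
def pyAt (xs : List Int) (k : Int) : Int := (PySem.List.pyGet? xs k).getD 0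

-- ===== PORT A =====
-- valA: the inner-loop body 'left = …; right = …; max_score[j] = max(left, right)'.
def valA (nums multipliers S : List Int) (n : Int) (i j : Nat) : Int :=
  let left := pyAt S ((j : Int) + 1) + pyAt nums (j : Int) * pyAt multipliers (i : Int)
  let right := pyAt S (j : Int) + pyAt nums (n - (i : Int) + (j : Int) - 1) * pyAt multipliers (i : Int)
  max left right
-- stepA: one outer iteration 'for j in range(i + 1): …; store = max_score'.
-- Note on Python aliasing: after the first outer iteration 'store = max_score'
-- makes the two names one list; within an inner sweep Python writes index j only
-- AFTER reading indices j and j+1, which are not yet overwritten in that sweep,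
-- so reading the previous row snapshot (st.1 below) yields the same values.
def stepA (nums multipliers : List Int) (n : Int) (st : List Int × List Int) (i : Nat) : List Int × List Int :=
  let ms := (List.range (i + 1)).foldl
    (fun (ms : List Int) (j : Nat) => ms.set j (valA nums multipliers st.1 n i j)) st.2
  (ms, ms)

def maximumScore (nums : List Int) (multipliers : List Int) : Int :=
  let m := multipliers.length
  let n : Int := nums.length
  let store : List Int := List.replicate (m + 1) 0
  let maxScore : List Int := List.replicate m 0
  let final := (List.range m).reverse.foldl (stepA nums multipliers n) (store, maxScore)
  pyAt final.1 0

-- ===== PORT B =====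
-- rowB nums multipliers n m f  is Source B's row(i) for i = m - f (f = operations remaining).
def rowB (nums : List Int) (multipliers : List Int) (n : Nat) (m : Nat) : Nat → List Int
  | 0 => List.replicate (m + 1) 0
  | f + 1 =>
    let i := m - (f + 1)
    let nxt := rowB nums multipliers n m f
    (List.range (i + 1)).map (fun (j : Nat) =>
      max (pyAt multipliers (i : Int) * pyAt nums (j : Int) + pyAt nxt ((j : Int) + 1))
          (pyAt multipliers (i : Int) * pyAt nums ((n : Int) - 1 - ((i : Int) - (j : Int))) + pyAt nxt (j : Int)))

def maximumScore_alt (nums : List Int) (multipliers : List Int) : Int :=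
  pyAt (rowB nums multipliers nums.length multipliers.length multipliers.length) 0

-- ===== PRECONDITION & SPEC =====
-- A raises IndexError (nums[j] with j reaching len(nums)) exactly when
-- len(multipliers) > len(nums); B raises there too. Nothing else is excluded.
def Pre_maximumScore (nums : List Int) (multipliers : List Int) : Prop :=
  multipliers.length ≤ nums.length
instance (nums : List Int) (multipliers : List Int) : Decidable (Pre_maximumScore nums multipliers) := by unfold Pre_maximumScore; infer_instance

def pvWitness_maximumScore : List Int × List Int := ([1, 2, 3], [2, -1])

def Spec_maximumScore (nums : List Int) (multipliers : List Int) (out : Int) : Prop := out = maximumScore_alt nums multipliers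
instance (nums : List Int) (multipliers : List Int) (out : Int) : Decidable (Spec_maximumScore nums multipliers out) := by unfold Spec_maximumScore; infer_instance

-- ===== CLAIM (what is proved, stated in full; the proofs are below) =====
def Claim_equal_maximumScore : Prop := ∀ (nums : List Int) (multipliers : List Int), Dom_maximumScore nums multipliers → Pre_maximumScore nums multipliers → Spec_maximumScore nums multipliers (maximumScore nums multipliers)

-- ===== LEMMAS AND PROOFS =====

theorem pyAt_natCast (xs : List Int) (j : Nat) : pyAt xs (j : Int) = xs.getD j 0 := by
  simp [pyAt, List.getD_eq_getElem?_getD]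

theorem pyAt_zero (xs : List Int) : pyAt xs 0 = xs.getD 0 0 := by
  simpa using pyAt_natCast xs 0

-- the inner sweep 'for j in range(k): ms[j] = v j' characterised elementwise
theorem foldl_set_getD (v : Nat → Int) :
    ∀ (k : Nat) (ms : List Int), k ≤ ms.length →
      (((List.range k).foldl (fun (ms : List Int) (j : Nat) => ms.set j (v j)) ms).length = ms.length ∧
       ∀ j : Nat, ((List.range k).foldl (fun (ms : List Int) (j : Nat) => ms.set j (v j)) ms).getD j 0 =
         if j < k then v j else ms.getD j 0) := by
  intro k
  induction k with
  | zero => intro ms _; simp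
  | succ k ih =>
    intro ms hk
    have ⟨hlen, hget⟩ := ih ms (by omega)
    rw [List.range_succ, List.foldl_append]
    constructor
    · simp [hlen]
    · intro j
      simp only [List.foldl_cons, List.foldl_nil]
      rcases eq_or_ne j k with rfl | hne
      · rw [List.getD_eq_getElem?_getD, List.getElem?_set_self (by omega)]
        simp
      · rw [List.getD_eq_getElem?_getD, List.getElem?_set_ne (by omega), ← List.getD_eq_getElem?_getD, hget]
        rcases Nat.lt_or_ge j k with h | h
        · simp [h, Nat.lt_succ_of_lt h]
        · have : ¬ j < k := by omega
          have : ¬ j < k + 1 := by omega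
          simp [*]

theorem rowB_succ_getD (nums multipliers : List Int) (n m f j : Nat) (hj : j < m - (f + 1) + 1) :
    (rowB nums multipliers n m (f + 1)).getD j 0 =
      max (pyAt multipliers ((m - (f + 1) : Nat) : Int) * pyAt nums (j : Int)
            + pyAt (rowB nums multipliers n m f) ((j : Int) + 1))
          (pyAt multipliers ((m - (f + 1) : Nat) : Int)
            * pyAt nums ((n : Int) - 1 - (((m - (f + 1) : Nat) : Int) - (j : Int)))
            + pyAt (rowB nums multipliers n m f) (j : Int)) := by
  rw [rowB]
  simp only [List.getD_eq_getElem?_getD, List.getElem?_map, List.getElem?_range, hj]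
  rfl

-- outer induction: folding iterations i = k-1 … 0 from a state holding row k
theorem outerA (nums multipliers : List Int) :
    ∀ (k : Nat), k ≤ multipliers.length →
    ∀ (S M : List Int), k + 1 ≤ S.length → M.length = multipliers.length →
    (∀ j : Nat, j ≤ k → S.getD j 0 =
        (rowB nums multipliers nums.length multipliers.length (multipliers.length - k)).getD j 0) →
    (((List.range k).reverse.foldl (stepA nums multipliers (nums.length : Int)) (S, M)).1).getD 0 0
      = (rowB nums multipliers nums.length multipliers.length multipliers.length).getD 0 0 := by
  intro k
  induction k with
  | zero =>
    intro _ S M _ _ hvals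
    simpa using hvals 0 (by omega)
  | succ k ih =>
    intro hk S M hS hM hvals
    rw [List.range_succ, List.reverse_append]
    simp only [List.reverse_cons, List.reverse_nil, List.nil_append, List.singleton_append, List.foldl_cons]
    set v : Nat → Int := valA nums multipliers S (nums.length : Int) k with hv
    have hstep : stepA nums multipliers (nums.length : Int) (S, M) k =
        (((List.range (k + 1)).foldl (fun (ms : List Int) (j : Nat) => ms.set j (v j)) M),
         ((List.range (k + 1)).foldl (fun (ms : List Int) (j : Nat) => ms.set j (v j)) M)) := rfl
    rw [hstep]
    have hkM : k + 1 ≤ M.length := by omega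
    have ⟨hlen, hget⟩ := foldl_set_getD v (k + 1) M hkM
    apply ih (by omega) _ _ (by omega) (by rw [hlen, hM])
    intro j hj
    rw [hget]
    have hjk : j < k + 1 := by omega
    simp only [hjk, if_pos]
    -- rewrite the target row as the successor case of rowB
    have hmk : multipliers.length - k = (multipliers.length - (k + 1)) + 1 := by omega
    have hik : multipliers.length - (multipliers.length - (k + 1) + 1) = k := by omega
    rw [hmk, rowB_succ_getD nums multipliers nums.length multipliers.length
          (multipliers.length - (k + 1)) j (by omega), hik]
    -- both sides are the same arithmetic on the same reads
    have hS1 : pyAt S ((j : Int) + 1) =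
        pyAt (rowB nums multipliers nums.length multipliers.length (multipliers.length - (k + 1))) ((j : Int) + 1) := by
      have h1 : ((j : Int) + 1) = ((j + 1 : Nat) : Int) := by push_cast; ring
      rw [h1, pyAt_natCast, pyAt_natCast, hvals (j + 1) (by omega)]
    have hS0 : pyAt S (j : Int) =
        pyAt (rowB nums multipliers nums.length multipliers.length (multipliers.length - (k + 1))) (j : Int) := by
      rw [pyAt_natCast, pyAt_natCast, hvals j (by omega)]
    rw [hv]
    simp only [valA, ← hS0, ← hS1]
    have hidx : (nums.length : Int) - (k : Int) + (j : Int) - 1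
        = (nums.length : Int) - 1 - ((k : Int) - (j : Int)) := by ring
    rw [hidx]
    ring_nf

-- ===== VERDICT (by name: the statement is the Claim_ definition above) =====
theorem maximumScore_spec : Claim_equal_maximumScore := by
  intro nums multipliers _ _
  show maximumScore nums multipliers = maximumScore_alt nums multipliers
  unfold maximumScore maximumScore_alt
  simp only [pyAt_zero]
  apply outerA nums multipliers multipliers.length (le_refl _)
    (List.replicate (multipliers.length + 1) 0) (List.replicate multipliers.length 0)
    (by simp) (by simp)
  intro j hj
  simp only [Nat.sub_self, rowB]
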